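-- pv_equiv track=rewrite | github.com/LineageOS/android_build_soong | scripts/hiddenapi/signature_patterns.py | validate_package_prefixes
-- ===== SOURCE A (Python) =====
-- def slash_package_to_dot_package(pkg):
--     return pkg.replace('/', '.')
--
-- def slash_packages_to_dot_packages(pkgs):
--     return [slash_package_to_dot_package(p) for p in pkgs]
--
-- def matched_by_package_prefix_pattern(package_prefixes, prefix):
--     for packagePrefix in package_prefixes:
--         if prefix == packagePrefix:
--             return packagePrefix
--         if (prefix.startswith(packagePrefix) and
--                 prefix[len(packagePrefix)] == '/'):
--             return packagePrefix
--     return False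
--
-- def validate_package_is_not_matched_by_package_prefix(package_type, pkg,
--                                                       package_prefixes):
--     package_prefix = matched_by_package_prefix_pattern(package_prefixes, pkg)
--     if package_prefix:
--         # A package prefix matches the package.
--         package_for_output = slash_package_to_dot_package(pkg)
--         package_prefix_for_output = slash_package_to_dot_package(package_prefix)
--         return [
--             f'{package_type} {package_for_output} is matched by '
--             f'package prefix {package_prefix_for_output}'
--         ]
--     return []
--
-- def validate_package_prefixes(split_packages, single_packages,
--                               package_prefixes):
--     # If there are no package prefixes then there is no possible conflict
--     # between them and the split packages.
--     if len(package_prefixes) == 0: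
--         return []
--
--     # Check to make sure that the split packages and package prefixes do not
--     # overlap.
--     errors = []
--     for split_package in split_packages:
--         if split_package == '*':
--             # A package prefix matches a split package.
--             package_prefixes_for_output = ', '.join(
--                 slash_packages_to_dot_packages(package_prefixes))
--             errors.append(
--                 "split package '*' conflicts with all package prefixes "
--                 f'{package_prefixes_for_output}\n'
--                 '    add split_packages:[] to fix')
--         else:
--             errs = validate_package_is_not_matched_by_package_prefix(
--                 'split package', split_package, package_prefixes)
--             errors.extend(errs)
--
--     # Check to make sure that the single packages and package prefixes do not
--     # overlap.
--     for single_package in single_packages: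
--         errs = validate_package_is_not_matched_by_package_prefix(
--             'single package', single_package, package_prefixes)
--         errors.extend(errs)
--     return errors
-- ===== SOURCE B (Python) =====
-- def validate_package_prefixes(split_packages, single_packages,
--                               package_prefixes):
--     if len(package_prefixes) == 0:
--         return []
--
--     # Index each prefix pattern by its first position in package_prefixes.
--     first_index = {}
--     for pos, pat in enumerate(package_prefixes):
--         first_index.setdefault(pat, pos)
--
--     def dotted(name):
--         return name.replace('/', '.')
--
--     star_error = ("split package '*' conflicts with all package prefixes "
--                   + ', '.join(dotted(pat) for pat in package_prefixes)
--                   + '\n    add split_packages:[] to fix')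
--
--     # A pattern matches pkg iff it is pkg itself or a slash-delimited proper
--     # prefix of pkg; the matching pattern reported is the EARLIEST one in
--     # package_prefixes, i.e. the candidate with the smallest first_index.
--     def best_pattern(pkg):
--         cuts = [pkg]
--         for i, ch in enumerate(pkg):
--             if ch == '/':
--                 cuts.append(pkg[:i])
--         best = None
--         for cut in cuts:
--             pos = first_index.get(cut)
--             if pos is not None and (best is None or pos < best):
--                 best = pos
--         return None if best is None else package_prefixes[best]
--
--     def messages(kind, pkg, allow_star):
--         if allow_star and pkg == '*':
--             return [star_error]
--         pat = best_pattern(pkg)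
--         if pat:
--             return [f'{kind} {dotted(pkg)} is matched by '
--                     f'package prefix {dotted(pat)}']
--         return []
--
--     return ([m for pkg in split_packages
--              for m in messages('split package', pkg, True)]
--             + [m for pkg in single_packages
--                for m in messages('single package', pkg, False)])
-- ===== Notes on version B (the rewrite author's own statement) =====
-- stated objective: faster
-- what changed: B builds a dict mapping each prefix pattern to its first position once, then for each package looks up only its O(depth) slash-ancestor candidates and reports the lowest-position hit, replacing A's per-package startswith scan over all prefixes; the output is assembled by flat list comprehensions over a per-package messages helper instead of A's foldl-extend loops.
import Mathlib
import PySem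

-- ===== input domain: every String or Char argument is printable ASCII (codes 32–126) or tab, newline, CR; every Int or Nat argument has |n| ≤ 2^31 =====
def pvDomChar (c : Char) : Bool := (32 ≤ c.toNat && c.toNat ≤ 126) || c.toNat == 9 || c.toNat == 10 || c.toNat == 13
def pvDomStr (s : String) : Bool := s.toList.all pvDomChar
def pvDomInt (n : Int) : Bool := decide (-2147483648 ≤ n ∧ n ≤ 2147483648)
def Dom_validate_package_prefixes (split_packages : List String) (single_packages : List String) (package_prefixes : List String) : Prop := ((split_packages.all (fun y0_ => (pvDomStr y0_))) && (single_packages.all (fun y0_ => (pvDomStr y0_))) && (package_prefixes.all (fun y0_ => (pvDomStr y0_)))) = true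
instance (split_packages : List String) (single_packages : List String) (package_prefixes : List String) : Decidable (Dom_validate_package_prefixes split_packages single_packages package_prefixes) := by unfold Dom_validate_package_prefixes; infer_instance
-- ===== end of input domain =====

-- B indexes each prefix pattern by its first position in a dict and, per package, looks up
-- its slash-ancestor candidates, reporting the lowest-index hit (objective: faster).

-- ===== PORT A =====

def slash_package_to_dot_package (pkg : String) : String :=
  PySem.Str.replace pkg "/" "."

def slash_packages_to_dot_packages (pkgs : List String) : List String :=
  pkgs.map (fun p => slash_package_to_dot_package p)

-- returns `some packagePrefix` for a match, `none` for Python's `False`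
def matched_by_package_prefix_pattern (package_prefixes : List String) (pfx : String) : Option String :=
  match package_prefixes with
  | [] => none
  | packagePrefix :: rest =>
    if pfx == packagePrefix then some packagePrefix
    else if PySem.Str.startswith pfx packagePrefix &&
            (PySem.Str.pyGet? pfx (PySem.Str.len packagePrefix) == some '/') then
      some packagePrefix
    else matched_by_package_prefix_pattern rest pfx

def validate_package_is_not_matched_by_package_prefix (package_type : String) (pkg : String)
    (package_prefixes : List String) : List String :=
  match matched_by_package_prefix_pattern package_prefixes pkg with
  | some package_prefix =>
    -- Python's `if package_prefix:` — the empty string is falsy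
    if package_prefix == "" then []
    else [package_type ++ " " ++ slash_package_to_dot_package pkg ++ " is matched by "
          ++ "package prefix " ++ slash_package_to_dot_package package_prefix]
  | none => []

def validate_package_prefixes (split_packages : List String) (single_packages : List String)
    (package_prefixes : List String) : List String :=
  if package_prefixes.length == 0 then []
  else
    let errors : List String := []
    let errors := split_packages.foldl (fun errors split_package =>
      if split_package == "*" then
        errors ++ ["split package '*' conflicts with all package prefixes "
          ++ PySem.Str.join ", " (slash_packages_to_dot_packages package_prefixes)
          ++ "\n    add split_packages:[] to fix"]
      else
        errors ++ validate_package_is_not_matched_by_package_prefix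
          "split package" split_package package_prefixes) errors
    single_packages.foldl (fun errors single_package =>
      errors ++ validate_package_is_not_matched_by_package_prefix
        "single package" single_package package_prefixes) errors

-- ===== PORT B =====

-- Source B `dotted(name)`
def pvDotted (name : String) : String :=
  PySem.Str.replace name "/" "."

-- Source B `best_pattern(pkg)`: candidate ancestors, then the dict hit with the smallest position
def pvBestPattern (first_index : PySem.Dict String Int) (package_prefixes : List String)
    (pkg : String) : Option String :=
  let cuts := (PySem.List.enumerate pkg.toList 0).foldl
    (fun cuts ic =>
      if ic.2 == '/' then cuts ++ [PySem.Str.slice pkg none (some ic.1)] else cuts)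
    [pkg]
  let best := cuts.foldl
    (fun best cut =>
      match first_index.get? cut with
      | none => best
      | some pos =>
        match best with
        | none => some pos
        | some b => if pos < b then some pos else some b)
    none
  match best with
  | none => none
  | some b => PySem.List.pyGet? package_prefixes b   -- in range whenever reached

-- Source B `messages(kind, pkg, allow_star)`
def pvMessages (star_error : String) (kind : String) (best_pattern : String → Option String)
    (allow_star : Bool) (pkg : String) : List String :=
  if allow_star && pkg == "*" then [star_error]
  else
    match best_pattern pkg with
    | some pat =>
      -- Source B's `if pat`: None and '' give no message
      if pat == "" then []
      else [kind ++ " " ++ pvDotted pkg ++ " is matched by package prefix " ++ pvDotted pat]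
    | none => []

def validate_package_prefixes_alt (split_packages : List String) (single_packages : List String)
    (package_prefixes : List String) : List String :=
  if package_prefixes.length == 0 then []
  else
    let first_index := (PySem.List.enumerate package_prefixes 0).foldl
      (fun d pp => PySem.Dict.setdefault d pp.2 pp.1) PySem.Dict.empty
    let star_error := "split package '*' conflicts with all package prefixes "
      ++ PySem.Str.join ", " (package_prefixes.map (fun pat => pvDotted pat))
      ++ "\n    add split_packages:[] to fix"
    -- the two list comprehensions
    split_packages.flatMap (fun pkg =>
        pvMessages star_error "split package" (pvBestPattern first_index package_prefixes)
          true pkg)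
      ++ single_packages.flatMap (fun pkg =>
        pvMessages star_error "single package" (pvBestPattern first_index package_prefixes)
          false pkg)

-- ===== PRECONDITION & SPEC =====
def Spec_validate_package_prefixes (split_packages : List String) (single_packages : List String) (package_prefixes : List String) (out : List String) : Prop := out = validate_package_prefixes_alt split_packages single_packages package_prefixes
instance (split_packages : List String) (single_packages : List String) (package_prefixes : List String) (out : List String) : Decidable (Spec_validate_package_prefixes split_packages single_packages package_prefixes out) := by unfold Spec_validate_package_prefixes; infer_instance

-- ===== CLAIM (what is proved, stated in full; the proofs are below) =====
def Claim_equal_validate_package_prefixes : Prop := ∀ (split_packages : List String) (single_packages : List String) (package_prefixes : List String), Dom_validate_package_prefixes split_packages single_packages package_prefixes → Spec_validate_package_prefixes split_packages single_packages package_prefixes (validate_package_prefixes split_packages single_packages package_prefixes)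

-- ===== LEMMAS AND PROOFS =====

-- A's per-prefix test, as a Bool predicate
def pvCond (pkg p : String) : Bool :=
  (pkg == p) || (PySem.Str.startswith pkg p
    && (PySem.Str.pyGet? pkg (PySem.Str.len p) == some '/'))

-- B's candidate list for pkg
def pvCuts (pkg : String) : List String :=
  (PySem.List.enumerate pkg.toList 0).foldl
    (fun cuts ic =>
      if ic.2 == '/' then cuts ++ [PySem.Str.slice pkg none (some ic.1)] else cuts)
    [pkg]

-- the option-min combiner hidden in B's best-position loop
def pvOMin (a b : Option Int) : Option Int :=
  match a, b with
  | none, b => b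
  | some x, none => some x
  | some x, some y => some (min x y)

theorem pv_mem_cuts (pkg p : String) :
    p ∈ pvCuts pkg ↔ pvCond pkg p = true := by
  unfold pvCuts pvCond
  rw [PySem.List.foldl_append_if]
  simp only [List.singleton_append, List.mem_cons, List.mem_map, List.mem_filter,
    Bool.or_eq_true, Bool.and_eq_true, beq_iff_eq, PySem.Str.pyGet?_eq, PySem.Str.len_eq,
    PySem.Chars.pyGet?_eq_listPyGet?, PySem.List.pyGet?_natCast]
  constructor
  · rintro (rfl | ⟨ic, ⟨hic, hc⟩, rfl⟩)
    · exact Or.inl rfl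
    · rw [PySem.List.mem_enumerate_iff] at hic
      obtain ⟨k, hk, rfl⟩ := hic
      right
      have hsl : (PySem.Str.slice pkg none (some ((0 : Int) + (k : Int)))).toList
          = pkg.toList.take k := by
        simp only [PySem.Str.toList_slice, PySem.Chars.slice_eq_listSlice]
        rw [show ((0 : Int) + (k : Int)) = ((k : Nat) : Int) by ring]
        exact PySem.List.slice_to_natCast pkg.toList k
      have hlen : (PySem.Str.slice pkg none (some ((0 : Int) + (k : Int)))).toList.length = k := by
        rw [hsl]; exact List.length_take_of_le (le_of_lt hk)
      constructor
      · rw [PySem.Str.startswith_eq, PySem.Chars.startswith_iff, hsl]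
        exact List.take_prefix k pkg.toList
      · rw [hlen, List.getElem?_eq_getElem hk]
        exact congrArg some hc
  · rintro (rfl | ⟨hpre, hget⟩)
    · exact Or.inl rfl
    · rw [PySem.Str.startswith_eq, PySem.Chars.startswith_iff] at hpre
      have hk : p.toList.length < pkg.toList.length := by
        by_contra h
        rw [List.getElem?_eq_none (by omega)] at hget
        simp at hget
      have hc : pkg.toList[p.toList.length] = '/' := by
        rw [List.getElem?_eq_getElem hk] at hget
        exact Option.some.inj hget
      refine Or.inr ⟨((0 : Int) + (p.toList.length : Int), '/'), ⟨?_, ?_⟩, ?_⟩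
      · rw [PySem.List.mem_enumerate_iff]
        exact ⟨p.toList.length, hk, by rw [hc]⟩
      · simp
      · apply String.toList_inj.mp
        simp only [PySem.Str.toList_slice, PySem.Chars.slice_eq_listSlice]
        rw [show ((0 : Int) + (p.toList.length : Int)) = ((p.toList.length : Nat) : Int) by
          ring]
        rw [PySem.List.slice_to_natCast pkg.toList p.toList.length]
        exact (List.prefix_iff_eq_take.mp hpre).symm

-- the first_index dict looks up the first position in the list
theorem pv_index_get (l : List String) (s : Int) (d : PySem.Dict String Int) (c : String) :
    ((PySem.List.enumerate l s).foldl
        (fun d pp => PySem.Dict.setdefault d pp.2 pp.1) d).get? c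
      = ((d.get? c).or ((PySem.List.index? l c).map (fun k => s + (k : Int)))) := by
  induction l generalizing s d with
  | nil =>
    simp [PySem.List.enumerate_nil, PySem.List.index?_eq_idxOf?]
  | cons x t ih =>
    rw [PySem.List.enumerate_cons, List.foldl_cons, ih]
    by_cases hxc : x = c
    · subst hxc
      rw [PySem.Dict.get?_setdefault_self, PySem.List.index?_cons_self]
      cases hd : d.get? x <;> simp
    · have hd' : (PySem.Dict.setdefault d x s).get? c = d.get? c := by
        by_cases hcont : d.contains x
        · rw [PySem.Dict.setdefault_of_contains d s hcont]
        · rw [PySem.Dict.setdefault_of_not_contains d s (by simpa using hcont),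
            PySem.Dict.get?_insert_of_ne d s (fun h => hxc h.symm)]
      rw [hd', PySem.List.index?_cons_of_ne t hxc]
      cases hi : PySem.List.index? t c
      · simp
      · rename_i k
        have hcast : s + 1 + (k : Int) = s + ((k + 1 : Nat) : Int) := by push_cast; ring
        simp [hcast]

-- B's min loop is a fold of pvOMin
theorem pv_best_loop (f : String → Option Int) (cuts : List String) (acc : Option Int) :
    cuts.foldl
      (fun best cut =>
        match f cut with
        | none => best
        | some pos =>
          match best with
          | none => some pos
          | some b => if pos < b then some pos else some b)
      acc
    = (cuts.map f).foldl pvOMin acc := by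
  induction cuts generalizing acc with
  | nil => rfl
  | cons cut rest ih =>
    rw [List.foldl_cons, List.map_cons, List.foldl_cons, ih]
    congr 1
    cases hf : f cut <;> cases acc <;> simp only [pvOMin]
    rename_i pos b
    rcases lt_or_ge pos b with h | h
    · rw [if_pos h]; exact congrArg some (by omega)
    · rw [if_neg (by omega)]; exact congrArg some (by omega)

-- once the accumulator is zero, a nonnegative tail keeps it there
theorem pv_foldl_omin_zero_acc (xs : List (Option Int))
    (h : ∀ o ∈ xs, ∀ k : Int, o = some k → 0 ≤ k) :
    xs.foldl pvOMin (some 0) = some 0 := by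
  induction xs with
  | nil => rfl
  | cons y ys ihy =>
    rw [List.foldl_cons]
    have hy0 : pvOMin (some 0) y = some 0 := by
      cases hy : y
      · rfl
      · rename_i k
        have hk : (0 : Int) ≤ k := h y (by simp) k hy
        simp only [pvOMin]
        exact congrArg some (by omega)
    rw [hy0]
    exact ihy (fun o ho k hk => h o (List.mem_cons_of_mem _ ho) k hk)

-- a zero hit pins the min at zero
theorem pv_foldl_omin_zero (xs : List (Option Int))
    (h : ∀ o ∈ xs, ∀ k : Int, o = some k → 0 ≤ k) (hz : some 0 ∈ xs) (acc : Option Int)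
    (hacc : ∀ k : Int, acc = some k → 0 ≤ k) :
    xs.foldl pvOMin acc = some 0 := by
  induction xs generalizing acc with
  | nil => cases hz
  | cons x xs ih =>
    rw [List.foldl_cons]
    by_cases hx0 : x = some 0
    · subst hx0
      have hacc0 : pvOMin acc (some 0) = some 0 := by
        cases hacc' : acc
        · rfl
        · rename_i k
          have hk : (0 : Int) ≤ k := hacc k hacc'
          simp only [pvOMin]
          exact congrArg some (by omega)
      rw [hacc0]
      exact pv_foldl_omin_zero_acc xs (fun o ho k hk => h o (List.mem_cons_of_mem _ ho) k hk)
    · have hz' : some 0 ∈ xs := by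
        rcases hz with _ | h'
        · exact absurd rfl hx0
        · assumption
      refine ih (fun o ho k hk => h o (List.mem_cons_of_mem _ ho) k hk) hz' _ ?_
      intro k hk
      cases ha : acc <;> cases hxv : x <;> rw [ha, hxv] at hk <;> simp only [pvOMin, Option.some.injEq] at hk
      · exact absurd hk (by simp)
      · rename_i j
        have hj := h (some j) (by simp [hxv]) j rfl
        omega
      · rename_i j
        have hj := hacc j ha
        omega
      · rename_i j j'
        have h1 := hacc j ha
        have h2 := h (some j') (by simp [hxv]) j' rfl
        omega

-- shifting every position by one shifts the min by one
theorem pv_foldl_omin_shift (xs : List (Option Int)) (acc : Option Int) :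
    (xs.map (Option.map (· + 1))).foldl pvOMin (acc.map (· + 1))
      = (xs.foldl pvOMin acc).map (· + 1) := by
  induction xs generalizing acc with
  | nil => rfl
  | cons x xs ih =>
    rw [List.map_cons, List.foldl_cons, List.foldl_cons, ← ih]
    congr 1
    cases acc <;> cases x <;> simp only [pvOMin, Option.map_some, Option.map_none]
    congr 1
    omega

-- a fold of pvOMin over nones stays put
theorem pv_foldl_omin_none (xs : List (Option Int)) (h : ∀ o ∈ xs, o = none)
    (acc : Option Int) : xs.foldl pvOMin acc = acc := by
  induction xs generalizing acc with
  | nil => rfl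
  | cons x xs ih =>
    rw [List.foldl_cons, h x (by simp)]
    have hacc : pvOMin acc none = acc := by cases acc <;> rfl
    rw [hacc]
    exact ih (fun o ho => h o (List.mem_cons_of_mem _ ho)) acc

-- the min over candidates of first positions IS the first index whose element is a candidate
theorem pv_min_eq_findIdx (cuts : List String) (l : List String) :
    (cuts.map (fun c => (PySem.List.index? l c).map (fun k => (k : Int)))).foldl pvOMin none
      = (l.findIdx? (fun p => decide (p ∈ cuts))).map (fun k => (k : Int)) := by
  induction l with
  | nil =>
    rw [pv_foldl_omin_none _ ?_ none]
    · rfl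
    · intro o ho
      rcases List.mem_map.mp ho with ⟨c, _, rfl⟩
      simp [PySem.List.index?_eq_idxOf?]
  | cons a t ih =>
    rw [List.findIdx?_cons]
    by_cases ha : a ∈ cuts
    · rw [if_pos (by simpa using ha)]
      rw [pv_foldl_omin_zero]
      · rfl
      · intro o ho k hk
        rcases List.mem_map.mp ho with ⟨c, _, rfl⟩
        cases hi : PySem.List.index? (a :: t) c <;> rw [hi] at hk
        · simp at hk
        · rename_i j
          simp at hk
          omega
      · have hval : (fun c => (PySem.List.index? (a :: t) c).map (fun k => (k : Int))) a
            = some 0 := by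
          rw [show (fun c => (PySem.List.index? (a :: t) c).map (fun k => (k : Int))) a
              = (PySem.List.index? (a :: t) a).map (fun k => (k : Int)) from rfl,
            PySem.List.index?_cons_self]
          rfl
        exact hval ▸ List.mem_map_of_mem ha
      · intro k hk
        cases hk
    · rw [if_neg (by simpa using ha)]
      have key : cuts.map (fun c => (PySem.List.index? (a :: t) c).map (fun k => (k : Int)))
          = (cuts.map (fun c => (PySem.List.index? t c).map (fun k => (k : Int)))).map
              (Option.map (· + 1)) := by
        rw [List.map_map]
        refine List.map_congr_left ?_
        intro c hc
        have hac : a ≠ c := fun h => ha (h ▸ hc)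
        simp only [Function.comp_apply]
        rw [PySem.List.index?_cons_of_ne t hac]
        cases hi : PySem.List.index? t c
        · rfl
        · rename_i j
          simp
      rw [key]
      have hsh := pv_foldl_omin_shift
        (cuts.map (fun c => (PySem.List.index? t c).map (fun k => (k : Int)))) none
      rw [show (none : Option Int).map (· + 1) = none from rfl] at hsh
      rw [hsh, ih]
      cases hf : t.findIdx? (fun p => decide (p ∈ cuts)) <;> simp

-- A's scan is find? of pvCond
theorem pv_matched_eq_find (l : List String) (pkg : String) :
    matched_by_package_prefix_pattern l pkg = l.find? (fun p => pvCond pkg p) := by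
  induction l with
  | nil => rfl
  | cons p rest ih =>
    unfold matched_by_package_prefix_pattern
    rw [List.find?_cons]
    by_cases h1 : (pkg == p) = true
    · have hc : pvCond pkg p = true := by unfold pvCond; rw [h1]; rfl
      rw [if_pos h1, hc]
    · rw [if_neg h1]
      by_cases h2 : (PySem.Str.startswith pkg p
          && (PySem.Str.pyGet? pkg (PySem.Str.len p) == some '/')) = true
      · have hc : pvCond pkg p = true := by
          unfold pvCond; rw [h2, Bool.or_true]
        rw [if_pos h2, hc]
      · have hc : pvCond pkg p = false := by
          unfold pvCond
          rw [Bool.eq_false_iff.mpr h1, Bool.eq_false_iff.mpr h2, Bool.or_false]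
        rw [if_neg h2, hc, ih]

-- B's best_pattern equals A's scan
theorem pv_best_eq_matched (l : List String) (pkg : String) :
    pvBestPattern
      ((PySem.List.enumerate l 0).foldl
        (fun d pp => PySem.Dict.setdefault d pp.2 pp.1) PySem.Dict.empty) l pkg
      = matched_by_package_prefix_pattern l pkg := by
  have h0 : pvBestPattern
      ((PySem.List.enumerate l 0).foldl
        (fun d pp => PySem.Dict.setdefault d pp.2 pp.1) PySem.Dict.empty) l pkg
      = (match (pvCuts pkg).foldl
          (fun best cut =>
            match ((PySem.List.enumerate l 0).foldl
                (fun d pp => PySem.Dict.setdefault d pp.2 pp.1) PySem.Dict.empty).get? cut with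
            | none => best
            | some pos =>
              match best with
              | none => some pos
              | some b => if pos < b then some pos else some b)
          none with
        | none => none
        | some b => PySem.List.pyGet? l b) := rfl
  rw [h0, pv_best_loop]
  have hf : ((PySem.List.enumerate l 0).foldl
      (fun d pp => PySem.Dict.setdefault d pp.2 pp.1) PySem.Dict.empty).get?
      = fun c => (PySem.List.index? l c).map (fun k => (k : Int)) := by
    funext c
    rw [pv_index_get l 0 PySem.Dict.empty c, PySem.Dict.get?_empty, Option.none_or]
    cases hi : PySem.List.index? l c
    · rfl
    · simp
  rw [hf, pv_min_eq_findIdx]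
  have hpred : (fun p => decide (p ∈ pvCuts pkg)) = fun p => pvCond pkg p := by
    funext p
    rw [Bool.eq_iff_iff]
    simp [pv_mem_cuts]
  rw [hpred, pv_matched_eq_find, List.find?_eq_bind_findIdx?_getElem?]
  cases hfi : l.findIdx? (fun p => pvCond pkg p)
  · rfl
  · rename_i k
    simp only [Option.bind_some]
    exact PySem.List.pyGet?_natCast l k

-- merging the two adjacent message literals of A's f-strings
theorem pv_msg_merge (pre b : String) :
    pre ++ " is matched by " ++ "package prefix " ++ b
      = pre ++ " is matched by package prefix " ++ b := by
  rw [show pre ++ " is matched by " ++ "package prefix "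
      = pre ++ (" is matched by " ++ "package prefix ") from String.append_assoc ..]
  rfl

-- the per-package check of A agrees with B's best-pattern arm
theorem pv_arm_eq (l : List String) (kind pkg : String) :
    validate_package_is_not_matched_by_package_prefix kind pkg l
      = (match pvBestPattern
            ((PySem.List.enumerate l 0).foldl
              (fun d pp => PySem.Dict.setdefault d pp.2 pp.1) PySem.Dict.empty) l pkg with
        | some pat =>
          if pat == "" then []
          else [kind ++ " " ++ pvDotted pkg ++ " is matched by package prefix " ++ pvDotted pat]
        | none => []) := by
  unfold validate_package_is_not_matched_by_package_prefix
  rw [pv_best_eq_matched]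
  cases matched_by_package_prefix_pattern l pkg
  · rfl
  · rename_i pat
    by_cases hp : (pat == "") = true
    · simp only [hp, if_true]
    · simp only [hp, Bool.false_eq_true, if_false]
      rw [show slash_package_to_dot_package pkg = pvDotted pkg from rfl,
        show slash_package_to_dot_package pat = pvDotted pat from rfl,
        pv_msg_merge]

-- ===== VERDICT (by name: the statement is the Claim_ definition above) =====
theorem validate_package_prefixes_spec : Claim_equal_validate_package_prefixes := by
  intro split_packages single_packages package_prefixes _
  unfold Spec_validate_package_prefixes
  unfold validate_package_prefixes validate_package_prefixes_alt
  by_cases hlen : (package_prefixes.length == 0) = true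
  · rw [if_pos hlen, if_pos hlen]
  · rw [if_neg hlen, if_neg hlen]
    simp only [pvMessages]
    have hsplit : (fun (errors : List String) split_package =>
        if split_package == "*" then
          errors ++ ["split package '*' conflicts with all package prefixes "
            ++ PySem.Str.join ", " (slash_packages_to_dot_packages package_prefixes)
            ++ "\n    add split_packages:[] to fix"]
        else
          errors ++ validate_package_is_not_matched_by_package_prefix
            "split package" split_package package_prefixes)
        = fun errors split_package => errors ++
          (if split_package == "*" then
            ["split package '*' conflicts with all package prefixes "
              ++ PySem.Str.join ", " (slash_packages_to_dot_packages package_prefixes)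
              ++ "\n    add split_packages:[] to fix"]
          else validate_package_is_not_matched_by_package_prefix
            "split package" split_package package_prefixes) := by
      funext errors x
      by_cases hx : (x == "*") = true
      · rw [if_pos hx, if_pos hx]
      · rw [if_neg hx, if_neg hx]
    rw [hsplit, PySem.List.foldl_append_eq_flatMap, PySem.List.foldl_append_eq_flatMap,
      List.nil_append]
    congr 1
    · refine congrArg (fun f => List.flatMap f split_packages) (funext fun x => ?_)
      rw [Bool.true_and]
      by_cases hx : (x == "*") = true
      · rw [if_pos hx, if_pos hx]
        rfl
      · rw [if_neg hx, if_neg hx]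
        exact pv_arm_eq package_prefixes "split package" x
    · refine congrArg (fun f => List.flatMap f single_packages) (funext fun x => ?_)
      rw [Bool.false_and, if_neg (by simp)]
      exact pv_arm_eq package_prefixes "single package" x
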